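-- pv_equiv track=rewrite | github.com/hao2062/RV1126 | edit.py | remove_files_under_dir
-- ===== SOURCE A (Python) =====
-- def remove_files_under_dir(lines, b, e, d):
--     # 删除位于 d/ 下的所有文件条目（注释与 "!file"）
--     out = []
--     prefix = d + "/"
--     for i, ln in enumerate(lines):
--         if b < i < e:
--             if ln.startswith("# ") and not ln.startswith("# /") and ln[2:].startswith(prefix):
--                 continue
--             if ln.startswith("!") and not ln.startswith("!/") and ln[1:].startswith(prefix):
--                 continue
--         out.append(ln)
--     return out
-- ===== SOURCE B (Python) =====
-- def remove_files_under_dir(lines, b, e, d):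
--     # In-place reverse-index deletion: copy the whole list once, then walk the
--     # clamped window from its last index down to its first, deleting matching
--     # entries with `del`; no per-line index test and no rebuilt output list.
--     out = list(lines)
--     n = len(lines)
--     lo = max(0, min(b + 1, n))
--     hi = max(0, min(e, n))
--     prefix = d + "/"
--     for i in range(hi - 1, lo - 1, -1):
--         ln = out[i]
--         if ((ln.startswith("# ") and not ln.startswith("# /") and ln[2:].startswith(prefix))
--                 or (ln.startswith("!") and not ln.startswith("!/") and ln[1:].startswith(prefix))):
--             del out[i]
--     return out
-- ===== Notes on version B (the rewrite author's own statement) =====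
-- stated objective: alternative
-- what changed: Instead of rebuilding the output line by line with a per-index window test, B copies the list once, computes the clamped window bounds, and walks the window's indices in reverse deleting matching entries in place with del.
import Mathlib
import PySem

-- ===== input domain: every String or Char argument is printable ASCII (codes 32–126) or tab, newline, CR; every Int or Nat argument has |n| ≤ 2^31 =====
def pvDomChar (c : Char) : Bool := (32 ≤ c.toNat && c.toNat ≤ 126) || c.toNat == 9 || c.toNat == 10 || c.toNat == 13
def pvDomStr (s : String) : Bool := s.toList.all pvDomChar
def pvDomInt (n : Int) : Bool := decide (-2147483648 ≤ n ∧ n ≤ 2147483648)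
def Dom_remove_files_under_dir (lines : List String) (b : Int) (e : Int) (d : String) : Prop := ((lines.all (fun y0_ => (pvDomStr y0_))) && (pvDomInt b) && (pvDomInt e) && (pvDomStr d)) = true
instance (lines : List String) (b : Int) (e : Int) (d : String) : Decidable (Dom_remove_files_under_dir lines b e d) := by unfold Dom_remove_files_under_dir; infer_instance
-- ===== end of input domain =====

-- B copies the list once and deletes matching entries in place, walking the clamped window's indices in reverse (alternative decomposition, same order of cost).

-- ===== PORT A =====
-- the for-loop over enumerate(lines) as structural recursion over (i, acc)
def pvLoopA (b e : Int) (pre : String) (i : Int) (acc : List String) : List String → List String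
  | [] => acc
  | ln :: rest =>
    if b < i ∧ i < e then
      if PySem.Str.startswith ln "# " && !PySem.Str.startswith ln "# /" && PySem.Str.startswith (PySem.Str.slice ln (some 2) none) pre then
        pvLoopA b e pre (i + 1) acc rest
      else if PySem.Str.startswith ln "!" && !PySem.Str.startswith ln "!/" && PySem.Str.startswith (PySem.Str.slice ln (some 1) none) pre then
        pvLoopA b e pre (i + 1) acc rest
      else
        pvLoopA b e pre (i + 1) (acc ++ [ln]) rest
    else
      pvLoopA b e pre (i + 1) (acc ++ [ln]) rest

def remove_files_under_dir (lines : List String) (b : Int) (e : Int) (d : String) : List String :=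
  pvLoopA b e (d ++ "/") 0 [] lines

-- ===== PORT B =====
def pvIsEntry (pre ln : String) : Bool :=
  (PySem.Str.startswith ln "# " && !PySem.Str.startswith ln "# /" && PySem.Str.startswith (PySem.Str.slice ln (some 2) none) pre)
  || (PySem.Str.startswith ln "!" && !PySem.Str.startswith ln "!/" && PySem.Str.startswith (PySem.Str.slice ln (some 1) none) pre)

-- loop body: ln = out[i]; if is-entry then `del out[i]`.  `del out[i]` for the
-- 0 ≤ i < len(out) indices this loop produces is exactly List.eraseIdx i.toNat.
def pvDelStep (pre : String) (out : List String) (i : Int) : List String :=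
  match PySem.List.pyGet? out i with
  | none => out
  | some ln => if pvIsEntry pre ln then out.eraseIdx i.toNat else out

-- n = len(lines); lo = max(0, min(b+1, n)); hi = max(0, min(e, n)); the three locals are inlined
def remove_files_under_dir_alt (lines : List String) (b : Int) (e : Int) (d : String) : List String :=
  (PySem.List.pyRange (max 0 (min e (lines.length : Int)) - 1) (max 0 (min (b + 1) (lines.length : Int)) - 1) (-1)).foldl
    (pvDelStep (d ++ "/")) lines

-- ===== PRECONDITION & SPEC =====
def Spec_remove_files_under_dir (lines : List String) (b : Int) (e : Int) (d : String) (out : List String) : Prop := out = remove_files_under_dir_alt lines b e d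
instance (lines : List String) (b : Int) (e : Int) (d : String) (out : List String) : Decidable (Spec_remove_files_under_dir lines b e d out) := by unfold Spec_remove_files_under_dir; infer_instance

-- ===== CLAIM (what is proved, stated in full; the proofs are below) =====
def Claim_equal_remove_files_under_dir : Prop := ∀ (lines : List String) (b : Int) (e : Int) (d : String), Dom_remove_files_under_dir lines b e d → Spec_remove_files_under_dir lines b e d (remove_files_under_dir lines b e d)

-- ===== LEMMAS AND PROOFS =====

-- common recursive reference: index shifted into the bounds (b < i < e  ↔  b - i < 0 < e - i)
def pvSpec (pre : String) : Int → Int → List String → List String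
  | _, _, [] => []
  | b, e, ln :: rest =>
    if b < 0 ∧ 0 < e ∧ pvIsEntry pre ln then pvSpec pre (b - 1) (e - 1) rest
    else ln :: pvSpec pre (b - 1) (e - 1) rest

-- intermediate slice characterisation: head copied, window filtered, tail copied
def pvSliceForm (lines : List String) (b : Int) (e : Int) (d : String) : List String :=
  let n : Int := lines.length
  let lo : Nat := (min (b + 1) n).toNat
  let hi : Nat := (min e n).toNat
  if hi ≤ lo then lines
  else
    lines.take lo ++ ((lines.take hi).drop lo).filter (fun ln => !pvIsEntry (d ++ "/") ln) ++ lines.drop hi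

set_option maxRecDepth 10000 in
theorem pvLoopA_eq_spec (b e : Int) (pre : String) :
    ∀ (ls : List String) (i : Int) (acc : List String),
      pvLoopA b e pre i acc ls = acc ++ pvSpec pre (b - i) (e - i) ls := by
  intro ls
  induction ls with
  | nil => intro i acc; simp [pvLoopA, pvSpec]
  | cons ln rest ih =>
    intro i acc
    have e1 : b - (i + 1) = (b - i) - 1 := by omega
    have e2 : e - (i + 1) = (e - i) - 1 := by omega
    by_cases h : b < i ∧ i < e
    · have h1 : b - i < 0 := by omega
      have h2 : 0 < e - i := by omega
      simp only [pvLoopA, pvSpec, pvIsEntry, ih, e1, e2, if_pos h, h1, h2, true_and]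
      cases hc1 : (PySem.Str.startswith ln "# " && !PySem.Str.startswith ln "# /" && PySem.Str.startswith (PySem.Str.slice ln (some 2) none) pre) <;>
        cases hc2 : (PySem.Str.startswith ln "!" && !PySem.Str.startswith ln "!/" && PySem.Str.startswith (PySem.Str.slice ln (some 1) none) pre) <;>
          simp only [Bool.or_true, Bool.or_false, Bool.false_eq_true,
            if_false, if_true, List.append_assoc,
            List.cons_append, List.nil_append]
    · have hf : ¬(b - i < 0 ∧ 0 < e - i ∧ pvIsEntry pre ln = true) := by
        intro ⟨a1, a2, _⟩; exact h ⟨by omega, by omega⟩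
      simp only [pvLoopA, pvSpec, ih, e1, e2, if_neg h, if_neg hf]
      simp

theorem pvSliceForm_eq_spec (d : String) :
    ∀ (ls : List String) (b e : Int),
      pvSliceForm ls b e d = pvSpec (d ++ "/") b e ls := by
  intro ls
  induction ls with
  | nil =>
    intro b e
    simp only [pvSliceForm, pvSpec]
    split <;> simp_all
  | cons ln rest ih =>
    intro b e
    have ihr := ih (b - 1) (e - 1)
    simp only [pvSliceForm] at ihr ⊢
    have hbb : b - 1 + 1 = b := by ring
    rw [hbb] at ihr
    have hn : ((ln :: rest).length : Int) = (rest.length : Int) + 1 := by simp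
    by_cases hb : b < 0
    · -- lo = 0
      have hlo : (min (b + 1) ((ln :: rest).length : Int)).toNat = 0 := by simp at hn ⊢; omega
      have hlo' : (min b ((rest.length : Int))).toNat = 0 := by omega
      by_cases he : 0 < e
      · -- interior contains index 0
        have hhi : (min e ((ln :: rest).length : Int)).toNat = (min (e - 1) ((rest.length : Int))).toNat + 1 := by
          simp at hn ⊢; omega
        have hne : ¬((min (e - 1) ((rest.length : Int))).toNat + 1 ≤ 0) := by omega
        rw [hlo, hhi] at *
        rw [if_neg hne]
        simp only [List.take_zero, List.drop_zero, List.take_succ_cons, List.drop_succ_cons, List.nil_append,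
          List.filter_cons]
        rw [pvSpec]
        have hcond : (b < 0 ∧ 0 < e ∧ pvIsEntry (d ++ "/") ln = true) ↔ (pvIsEntry (d ++ "/") ln = true) := by
          constructor
          · exact fun x => x.2.2
          · exact fun x => ⟨hb, he, x⟩
        -- rest side: the slice expression equals the recursive form whether or not its window is empty
        have hrest : (rest.take ((min (e - 1) ((rest.length : Int))).toNat)).filter (fun ln => !pvIsEntry (d ++ "/") ln)
              ++ rest.drop ((min (e - 1) ((rest.length : Int))).toNat) = pvSpec (d ++ "/") (b - 1) (e - 1) rest := by
          rw [← ihr, hlo']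
          by_cases hz : (min (e - 1) ((rest.length : Int))).toNat ≤ 0
          · have : (min (e - 1) ((rest.length : Int))).toNat = 0 := by omega
            rw [if_pos hz, this]; simp
          · rw [if_neg hz]; simp
        by_cases hE : pvIsEntry (d ++ "/") ln = true
        · rw [if_pos (hcond.mpr hE)]
          simp only [hE, Bool.not_true, if_false, Bool.false_eq_true]
          exact hrest
        · rw [if_neg (fun x => hE (hcond.mp x))]
          simp only [hE, Bool.not_false, if_true]
          simp only [List.cons_append]
          rw [hrest]
      · -- e ≤ 0 : hi = 0, whole window empty; both sides copy
        have hhi : (min e ((ln :: rest).length : Int)).toNat = 0 := by omega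
        have hhi' : (min (e - 1) ((rest.length : Int))).toNat = 0 := by omega
        rw [hlo, hhi, if_pos (le_refl 0)]
        rw [pvSpec, if_neg (by intro x; exact he x.2.1)]
        rw [← ihr, hlo', hhi', if_pos (le_refl 0)]
    · -- b ≥ 0 : index 0 outside window; first line kept
      have hs : pvSpec (d ++ "/") b e (ln :: rest) = ln :: pvSpec (d ++ "/") (b - 1) (e - 1) rest := by
        rw [pvSpec, if_neg (by intro x; exact hb x.1)]
      rw [hs, ← ihr]
      have hlen : ((ln :: rest).length : Int) = (rest.length : Int) + 1 := by
        push_cast [List.length_cons]; ring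
      by_cases hz : (min e ((ln :: rest).length : Int)).toNat ≤ (min (b + 1) ((ln :: rest).length : Int)).toNat
      · have hz' : (min (e - 1) ((rest.length : Int))).toNat ≤ (min b ((rest.length : Int))).toNat := by
          rw [hlen] at hz; omega
        rw [if_pos hz, if_pos hz']
      · have hz' : ¬((min (e - 1) ((rest.length : Int))).toNat ≤ (min b ((rest.length : Int))).toNat) := by
          rw [hlen] at hz; omega
        have hlo : (min (b + 1) ((ln :: rest).length : Int)).toNat = (min b ((rest.length : Int))).toNat + 1 := by
          rw [hlen] at hz; omega
        have hhi : (min e ((ln :: rest).length : Int)).toNat = (min (e - 1) ((rest.length : Int))).toNat + 1 := by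
          rw [hlen] at hz; omega
        rw [if_neg hz, if_neg hz', hlo, hhi]
        simp only [List.take_succ_cons, List.drop_succ_cons, List.cons_append]

-- the reverse-deletion loop over a clamped window [lo, hi) equals head ++ filtered window ++ tail
theorem pvDelStep_eq (pre : String) (xs : List String) (i : Int) (ln : String)
    (h : PySem.List.pyGet? xs i = some ln) :
    pvDelStep pre xs i = if pvIsEntry pre ln then xs.eraseIdx i.toNat else xs := by
  simp only [pvDelStep, h]

theorem pvDel_eq_slice (pre : String) :
    ∀ (k : Nat) (xs : List String) (lo hi : Nat), hi = lo + k → hi ≤ xs.length →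
      (PySem.List.pyRange ((hi : Int) - 1) ((lo : Int) - 1) (-1)).foldl (pvDelStep pre) xs
        = xs.take lo ++ ((xs.take hi).drop lo).filter (fun ln => !pvIsEntry pre ln) ++ xs.drop hi := by
  intro k
  induction k with
  | zero =>
    intro xs lo hi hk hlen
    rw [PySem.List.pyRange_neg_one_eq_nil (by omega)]
    have hle : lo = hi := by omega
    rw [hle]
    have hnil : ((xs.take hi).drop hi) = [] :=
      List.drop_eq_nil_of_le (by rw [List.length_take]; omega)
    rw [hnil]
    simp
  | succ k ih =>
    intro xs lo hi hk hlen
    have hm : hi - 1 < xs.length := by omega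
    have hcons : PySem.List.pyRange ((hi : Int) - 1) ((lo : Int) - 1) (-1)
        = ((hi : Int) - 1) :: PySem.List.pyRange ((hi : Int) - 1 - 1) ((lo : Int) - 1) (-1) := by
      exact PySem.List.pyRange_neg_one_cons (by omega)
    have hcast : ((hi : Int) - 1) = ((hi - 1 : Nat) : Int) := by omega
    have hget : PySem.List.pyGet? xs ((hi : Int) - 1) = some (xs[hi - 1]'hm) := by
      rw [hcast, PySem.List.pyGet?_natCast, List.getElem?_eq_getElem hm]
    have htonat : ((hi : Int) - 1).toNat = hi - 1 := by omega
    have hcast2 : ((hi : Int) - 1 - 1) = (((hi - 1 : Nat) : Int) - 1) := by omega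
    rw [hcons, List.foldl_cons, pvDelStep_eq pre xs _ _ hget]
    have h1 : hi - 1 + 1 = hi := by omega
    -- window split: xs.take hi = xs.take (hi-1) ++ [xs[hi-1]]
    have hsplit : xs.take hi = xs.take (hi - 1) ++ [xs[hi - 1]'hm] := by
      conv_lhs => rw [← h1]
      rw [List.take_add_one, List.getElem?_eq_getElem hm]
      simp
    have hlt1 : (xs.take (hi - 1)).length = hi - 1 := by simp; omega
    have hwin : (xs.take hi).drop lo = ((xs.take (hi - 1)).drop lo) ++ [xs[hi - 1]'hm] := by
      rw [hsplit, List.drop_append, hlt1]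
      have h0 : lo - (hi - 1) = 0 := by omega
      rw [h0]; simp
    by_cases hE : pvIsEntry pre (xs[hi - 1]'hm) = true
    · rw [if_pos hE, htonat]
      have hE' : xs.eraseIdx (hi - 1) = xs.take (hi - 1) ++ xs.drop hi := by
        rw [List.eraseIdx_eq_take_drop_succ, h1]
      have hlenE : hi - 1 ≤ (xs.eraseIdx (hi - 1)).length := by
        rw [List.length_eraseIdx_of_lt hm]; omega
      rw [hcast2]
      rw [ih (xs.eraseIdx (hi - 1)) lo (hi - 1) (by omega) hlenE, hE']
      have t1 : (xs.take (hi - 1) ++ xs.drop hi).take lo = xs.take lo := by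
        rw [List.take_append, hlt1]
        have h0 : lo - (hi - 1) = 0 := by omega
        rw [h0, List.take_take]
        have : min lo (hi - 1) = lo := by omega
        simp [this]
      have t2 : (xs.take (hi - 1) ++ xs.drop hi).take (hi - 1) = xs.take (hi - 1) := by
        rw [List.take_append, hlt1]
        simp
      have t3 : (xs.take (hi - 1) ++ xs.drop hi).drop (hi - 1) = xs.drop hi := by
        rw [List.drop_append, hlt1]
        simp
      rw [t1, t2, t3, hwin, List.filter_append]
      simp [hE]
    · rw [if_neg hE, hcast2]
      rw [ih xs lo (hi - 1) (by omega) (by omega), hwin, List.filter_append]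
      have hkeep : [xs[hi - 1]'hm].filter (fun ln => !pvIsEntry pre ln) = [xs[hi - 1]'hm] := by
        simp [hE]
      rw [hkeep]
      have hdropm : xs.drop (hi - 1) = xs[hi - 1]'hm :: xs.drop hi := by
        rw [List.drop_eq_getElem_cons hm, h1]
      rw [hdropm]
      simp [List.append_assoc]

theorem pvAlt_eq_sliceForm (lines : List String) (b : Int) (e : Int) (d : String) :
    remove_files_under_dir_alt lines b e d = pvSliceForm lines b e d := by
  unfold remove_files_under_dir_alt pvSliceForm
  have hn0 : (0 : Int) ≤ (lines.length : Int) := by positivity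
  have hlo1 : max 0 (min (b + 1) (lines.length : Int)) = ((min (b + 1) (lines.length : Int)).toNat : Int) := by omega
  have hhi1 : max 0 (min e (lines.length : Int)) = ((min e (lines.length : Int)).toNat : Int) := by omega
  by_cases hle : (min e (lines.length : Int)).toNat ≤ (min (b + 1) (lines.length : Int)).toNat
  · rw [if_pos hle]
    rw [PySem.List.pyRange_neg_one_eq_nil (by omega)]
    simp
  · rw [if_neg hle]
    have hhiN : (min e (lines.length : Int)).toNat ≤ lines.length := by omega
    have h := pvDel_eq_slice (d ++ "/") ((min e (lines.length : Int)).toNat - (min (b + 1) (lines.length : Int)).toNat)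
      lines ((min (b + 1) (lines.length : Int)).toNat) ((min e (lines.length : Int)).toNat) (by omega) hhiN
    rw [hlo1, hhi1]
    exact h

-- ===== VERDICT =====
theorem remove_files_under_dir_spec : Claim_equal_remove_files_under_dir := by
  intro lines b e d _
  unfold Spec_remove_files_under_dir remove_files_under_dir
  rw [pvLoopA_eq_spec, pvAlt_eq_sliceForm, pvSliceForm_eq_spec]
  simp
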